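-- pv_equiv track=rewrite | github.com/Igasawa/Skills-personal | scripts/analyze_commit.py | infer_scope
-- ===== SOURCE A (Python) =====
-- from typing import Any, Dict, List, Optional, Tuple
--
-- def infer_scope(files: List[Dict[str, str]]) -> List[str]:
--     scopes = set()
--     for item in files:
--         path = item.get("path", "").lower()
--         if not path:
--             continue
--         if path.startswith("docs/"):
--             scopes.add("docs")
--         elif path.startswith("scripts/"):
--             scopes.add("scripts")
--         elif path.startswith(".github/"):
--             scopes.add("ci")
--         elif path.startswith(".githooks/") or path.startswith(".git"):
--             scopes.add("ci")
--         elif any(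
--             path.endswith(ext)
--             for ext in [".py", ".js", ".ts", ".tsx", ".jsx", ".java"]
--         ):
--             scopes.add("application")
--         else:
--             scopes.add("other")
--     return sorted(scopes) if scopes else ["unknown"]
-- ===== SOURCE B (Python) =====
-- def infer_scope(files):
--     paths = [p for p in (item.get("path", "").lower() for item in files) if p]
--
--     def reserved_prefix(p):
--         return p.startswith("docs/") or p.startswith("scripts/") or p.startswith(".git")
--
--     def is_code(p):
--         return p.endswith((".py", ".js", ".ts", ".tsx", ".jsx", ".java"))
--
--     # One membership test per possible scope, listed in sorted order, so the
--     # answer needs neither a set nor a sort.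
--     checks = [
--         ("application", lambda p: not reserved_prefix(p) and is_code(p)),
--         ("ci", lambda p: p.startswith(".git")),
--         ("docs", lambda p: p.startswith("docs/")),
--         ("other", lambda p: not reserved_prefix(p) and not is_code(p)),
--         ("scripts", lambda p: p.startswith("scripts/")),
--     ]
--     result = [scope for scope, hit in checks if any(hit(p) for p in paths)]
--     return result or ["unknown"]
-- ===== Notes on version B (the rewrite author's own statement) =====
-- stated objective: alternative
-- what changed: Instead of classifying each file into a set and sorting it, B makes one membership scan of the paths per possible scope, listing the five scope tests in sorted order, so no set and no sort are ever built.
import Mathlib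
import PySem

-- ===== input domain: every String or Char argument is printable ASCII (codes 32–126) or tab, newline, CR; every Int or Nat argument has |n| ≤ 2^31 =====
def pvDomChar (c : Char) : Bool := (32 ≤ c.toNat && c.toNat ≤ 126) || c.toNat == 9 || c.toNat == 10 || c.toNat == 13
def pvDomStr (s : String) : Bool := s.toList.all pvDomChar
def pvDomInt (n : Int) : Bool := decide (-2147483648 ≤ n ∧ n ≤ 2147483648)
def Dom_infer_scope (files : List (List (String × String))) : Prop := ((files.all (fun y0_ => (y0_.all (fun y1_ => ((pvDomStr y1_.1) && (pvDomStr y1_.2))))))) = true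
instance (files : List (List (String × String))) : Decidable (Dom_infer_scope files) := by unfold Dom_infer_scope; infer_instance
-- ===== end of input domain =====

-- B drops A's set-and-sort entirely: one membership scan of the paths per possible scope,
-- the scopes listed in sorted order (objective: alternative).

-- ===== PORT A =====
def infer_scope (files : List (List (String × String))) : List String :=
  let scopes : PySem.Set String := files.foldl (fun scopes item =>
    let path := PySem.Str.lower ((PySem.Dict.mk item).getD "path" "")
    if path = "" then scopes
    else if PySem.Str.startswith path "docs/" then scopes.add "docs"
    else if PySem.Str.startswith path "scripts/" then scopes.add "scripts"
    else if PySem.Str.startswith path ".github/" then scopes.add "ci"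
    else if PySem.Str.startswith path ".githooks/" || PySem.Str.startswith path ".git" then scopes.add "ci"
    else if [".py", ".js", ".ts", ".tsx", ".jsx", ".java"].any (fun ext => PySem.Str.endswith path ext) then scopes.add "application"
    else scopes.add "other") PySem.Set.empty
  if scopes ≠ [] then PySem.List.sorted scopes (fun x => x) false else ["unknown"]

-- ===== PORT B =====
def pvReservedPrefix (p : String) : Bool :=
  PySem.Str.startswith p "docs/" || PySem.Str.startswith p "scripts/" || PySem.Str.startswith p ".git"

def pvIsCode (p : String) : Bool :=
  [".py", ".js", ".ts", ".tsx", ".jsx", ".java"].any (fun ext => PySem.Str.endswith p ext)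

def pvChecks : List (String × (String → Bool)) :=
  [("application", fun p => !pvReservedPrefix p && pvIsCode p),
   ("ci", fun p => PySem.Str.startswith p ".git"),
   ("docs", fun p => PySem.Str.startswith p "docs/"),
   ("other", fun p => !pvReservedPrefix p && !pvIsCode p),
   ("scripts", fun p => PySem.Str.startswith p "scripts/")]

def infer_scope_alt (files : List (List (String × String))) : List String :=
  let paths := (files.map (fun item => PySem.Str.lower ((PySem.Dict.mk item).getD "path" ""))).filter (fun p => p ≠ "")
  let result := (pvChecks.filter (fun c => paths.any c.2)).map (fun c => c.1)
  if result ≠ [] then result else ["unknown"]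

-- ===== PRECONDITION & SPEC =====
def Spec_infer_scope (files : List (List (String × String))) (out : List String) : Prop := out = infer_scope_alt files
instance (files : List (List (String × String))) (out : List String) : Decidable (Spec_infer_scope files out) := by unfold Spec_infer_scope; infer_instance

-- ===== CLAIM (what is proved, stated in full; the proofs are below) =====
def Claim_equal_infer_scope : Prop := ∀ (files : List (List (String × String))), Dom_infer_scope files → Spec_infer_scope files (infer_scope files)

-- ===== LEMMAS AND PROOFS =====

-- The scope A's if/elif cascade assigns to one non-empty path (proof-only helper).
def pvClassify (p : String) : String :=
  if PySem.Str.startswith p "docs/" then "docs"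
  else if PySem.Str.startswith p "scripts/" then "scripts"
  else if PySem.Str.startswith p ".github/" then "ci"
  else if PySem.Str.startswith p ".githooks/" || PySem.Str.startswith p ".git" then "ci"
  else if pvIsCode p then "application"
  else "other"

-- prefix disjointness / containment facts about the literal rule strings
lemma cs_docs_not_scripts (l : List Char) (h : PySem.Chars.startswith l ['d','o','c','s','/'] = true) :
    PySem.Chars.startswith l ['s','c','r','i','p','t','s','/'] = false := by
  match l with
  | [] => simp [PySem.Chars.startswith, List.isPrefixOf] at h
  | c :: t =>
    simp_all [PySem.Chars.startswith, List.isPrefixOf]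
    rintro rfl; simp_all

lemma cs_docs_not_git (l : List Char) (h : PySem.Chars.startswith l ['d','o','c','s','/'] = true) :
    PySem.Chars.startswith l ['.','g','i','t'] = false := by
  match l with
  | [] => simp [PySem.Chars.startswith, List.isPrefixOf] at h
  | c :: t =>
    simp_all [PySem.Chars.startswith, List.isPrefixOf]
    rintro rfl; simp_all

lemma cs_scripts_not_git (l : List Char) (h : PySem.Chars.startswith l ['s','c','r','i','p','t','s','/'] = true) :
    PySem.Chars.startswith l ['.','g','i','t'] = false := by
  match l with
  | [] => simp [PySem.Chars.startswith, List.isPrefixOf] at h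
  | c :: t =>
    simp_all [PySem.Chars.startswith, List.isPrefixOf]
    rintro rfl; simp_all

lemma cs_github_git (l : List Char) (h : PySem.Chars.startswith l ['.','g','i','t','h','u','b','/'] = true) :
    PySem.Chars.startswith l ['.','g','i','t'] = true := by
  match l with
  | c0 :: c1 :: c2 :: c3 :: t => simp_all [PySem.Chars.startswith, List.isPrefixOf]; tauto
  | [] | [_] | [_, _] | [_, _, _] => simp_all [PySem.Chars.startswith, List.isPrefixOf]

lemma cs_githooks_git (l : List Char) (h : PySem.Chars.startswith l ['.','g','i','t','h','o','o','k','s','/'] = true) :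
    PySem.Chars.startswith l ['.','g','i','t'] = true := by
  match l with
  | c0 :: c1 :: c2 :: c3 :: t => simp_all [PySem.Chars.startswith, List.isPrefixOf]; tauto
  | [] | [_] | [_, _] | [_, _, _] => simp_all [PySem.Chars.startswith, List.isPrefixOf]

-- the .github/ / .githooks/ / .git branches of the cascade collapse to one test on '.git'
lemma classify_canon (p : String) :
    pvClassify p =
      if PySem.Str.startswith p "docs/" then "docs"
      else if PySem.Str.startswith p "scripts/" then "scripts"
      else if PySem.Str.startswith p ".git" then "ci"
      else if pvIsCode p then "application"
      else "other" := by
  unfold pvClassify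
  simp only [PySem.Str.startswith, String.reduceToList]
  by_cases hg : PySem.Chars.startswith p.toList ['.','g','i','t'] = true
  case pos => simp [hg]
  case neg =>
    rw [Bool.not_eq_true] at hg
    have h1 : PySem.Chars.startswith p.toList ['.','g','i','t','h','u','b','/'] = false := by
      cases h : PySem.Chars.startswith p.toList ['.','g','i','t','h','u','b','/'] with
      | false => rfl
      | true => exact absurd (cs_github_git _ h) (by simp [hg])
    have h2 : PySem.Chars.startswith p.toList ['.','g','i','t','h','o','o','k','s','/'] = false := by
      cases h : PySem.Chars.startswith p.toList ['.','g','i','t','h','o','o','k','s','/'] with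
      | false => rfl
      | true => exact absurd (cs_githooks_git _ h) (by simp [hg])
    simp [hg, h1, h2]

-- each of B's five membership tests holds on a path exactly when A classifies it to that scope
lemma pred_eq_classify (p : String) (c : String × (String → Bool)) (hc : c ∈ pvChecks) :
    c.2 p = (pvClassify p == c.1) := by
  rw [classify_canon]
  cases hd : PySem.Chars.startswith p.toList ['d','o','c','s','/'] <;>
  cases hs : PySem.Chars.startswith p.toList ['s','c','r','i','p','t','s','/'] <;>
  cases hg : PySem.Chars.startswith p.toList ['.','g','i','t'] <;>
  cases hk : pvIsCode p <;>
  first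
  | (have h' := cs_docs_not_scripts _ hd; rw [h'] at hs; exact Bool.noConfusion hs)
  | (have h' := cs_docs_not_git _ hd; rw [h'] at hg; exact Bool.noConfusion hg)
  | (have h' := cs_scripts_not_git _ hs; rw [h'] at hg; exact Bool.noConfusion hg)
  | (fin_cases hc <;> simp [pvReservedPrefix, PySem.Str.startswith, hd, hs, hg, hk])

lemma classify_mem_candidates (p : String) : pvClassify p ∈ pvChecks.map (fun c => c.1) := by
  unfold pvClassify pvChecks
  split_ifs <;> simp

-- A's loop is folding Set.add of pvClassify over the non-empty lowered paths
lemma foldl_cascade_eq (files : List (List (String × String))) (s : PySem.Set String) :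
    files.foldl (fun scopes item =>
      let path := PySem.Str.lower ((PySem.Dict.mk item).getD "path" "")
      if path = "" then scopes
      else if PySem.Str.startswith path "docs/" then scopes.add "docs"
      else if PySem.Str.startswith path "scripts/" then scopes.add "scripts"
      else if PySem.Str.startswith path ".github/" then scopes.add "ci"
      else if PySem.Str.startswith path ".githooks/" || PySem.Str.startswith path ".git" then scopes.add "ci"
      else if [".py", ".js", ".ts", ".tsx", ".jsx", ".java"].any (fun ext => PySem.Str.endswith path ext) then scopes.add "application"
      else scopes.add "other") s
    = ((((files.map (fun item => PySem.Str.lower ((PySem.Dict.mk item).getD "path" ""))).filter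
          (fun p => p ≠ "")).map pvClassify)).foldl PySem.Set.add s := by
  induction files generalizing s with
  | nil => rfl
  | cons item rest ih =>
    simp only [List.foldl_cons, List.map_cons, List.filter_cons]
    by_cases h : PySem.Str.lower ((PySem.Dict.mk item).getD "path" "") = ""
    · simp only [h, ne_eq, decide_not]
      simpa using ih s
    · rw [show (if PySem.Str.lower ((PySem.Dict.mk item).getD "path" "") = "" then s
          else if PySem.Str.startswith (PySem.Str.lower ((PySem.Dict.mk item).getD "path" "")) "docs/" then s.add "docs"
          else if PySem.Str.startswith (PySem.Str.lower ((PySem.Dict.mk item).getD "path" "")) "scripts/" then s.add "scripts"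
          else if PySem.Str.startswith (PySem.Str.lower ((PySem.Dict.mk item).getD "path" "")) ".github/" then s.add "ci"
          else if PySem.Str.startswith (PySem.Str.lower ((PySem.Dict.mk item).getD "path" "")) ".githooks/" || PySem.Str.startswith (PySem.Str.lower ((PySem.Dict.mk item).getD "path" "")) ".git" then s.add "ci"
          else if [".py", ".js", ".ts", ".tsx", ".jsx", ".java"].any (fun ext => PySem.Str.endswith (PySem.Str.lower ((PySem.Dict.mk item).getD "path" "")) ext) then s.add "application"
          else s.add "other")
          = s.add (pvClassify (PySem.Str.lower ((PySem.Dict.mk item).getD "path" ""))) from by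
            unfold pvClassify pvIsCode; rw [if_neg h]; split_ifs <;> rfl,
        ih,
        if_pos (show decide (PySem.Str.lower ((PySem.Dict.mk item).getD "path" "") ≠ "") = true by simp [h]),
        List.map_cons, List.foldl_cons]

-- B's per-scope scan over the candidates in sorted order IS sorted(set(classified paths))
lemma filter_eq_sorted (paths : List String) :
    (pvChecks.filter (fun c => paths.any c.2)).map (fun c => c.1)
      = PySem.List.sorted (PySem.Set.ofList (paths.map pvClassify)) (fun x => x) false := by
  have hany : ∀ c ∈ pvChecks, paths.any c.2 = decide (c.1 ∈ paths.map pvClassify) := by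
    intro c hc
    rw [show c.2 = (fun p => pvClassify p == c.1) from funext fun p => pred_eq_classify p c hc,
      List.any_eq]
    refine decide_eq_decide.mpr ⟨?_, ?_⟩
    · rintro ⟨x, hx, hbeq⟩
      exact List.mem_map.mpr ⟨x, hx, beq_iff_eq.mp hbeq⟩
    · intro h
      obtain ⟨x, hx, hxe⟩ := List.mem_map.mp h
      exact ⟨x, hx, beq_iff_eq.mpr hxe⟩
  have hsub : List.Sublist ((pvChecks.filter (fun c => paths.any c.2)).map (fun c => c.1))
      (pvChecks.map (fun c => c.1)) :=
    List.Sublist.map _ List.filter_sublist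
  symm
  apply PySem.List.sorted_eq_of_perm_of_pairwise_lt
  · apply (List.perm_ext_iff_of_nodup _ (PySem.Set.nodup_ofList _)).mpr
    · intro s
      constructor
      · intro hsmem
        obtain ⟨c, hcf, rfl⟩ := List.mem_map.mp hsmem
        obtain ⟨hc, hany'⟩ := List.mem_filter.mp hcf
        rw [hany c hc] at hany'
        exact (PySem.Set.mem_ofList _ _).mpr (of_decide_eq_true hany')
      · intro hsmem
        have hmem : s ∈ paths.map pvClassify := (PySem.Set.mem_ofList _ _).mp hsmem
        obtain ⟨p, hp, hps⟩ := List.mem_map.mp hmem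
        obtain ⟨c, hc, hfst⟩ := List.mem_map.mp (classify_mem_candidates p)
        refine List.mem_map.mpr ⟨c, List.mem_filter.mpr ⟨hc, ?_⟩, by rw [hfst, hps]⟩
        rw [hany c hc, hfst, hps]
        exact decide_eq_true hmem
    · exact List.Nodup.sublist hsub (by decide)
  · exact List.Pairwise.sublist hsub (by simp [pvChecks]; decide)

-- ===== VERDICT (by name: the statement is the Claim_ definition above) =====
theorem infer_scope_spec : Claim_equal_infer_scope := by
  intro files _
  show infer_scope files = infer_scope_alt files
  simp only [infer_scope, infer_scope_alt, PySem.Set.empty]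
  rw [foldl_cascade_eq, ← PySem.Set.ofList_eq_foldl, filter_eq_sorted]
  simp only [ne_eq, PySem.List.sorted_eq_nil_iff]
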